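-- pv_equiv track=rewrite | github.com/gaocf888/models_app_framework | app/services/chatbot_image_utils.py | strip_image_block_from_history
-- ===== SOURCE A (Python) =====
-- IMAGE_BLOCK_MARKER = "\n\n[image_urls]\n"
--
-- ORIGINAL_IMAGE_BLOCK_MARKER = "\n\n[original_image_urls]\n"
--
-- PROCESSED_IMAGE_BLOCK_MARKER = "\n\n[processed_image_urls]\n"
--
-- def strip_image_block_from_history(content: str) -> str:
--     """从历史消息中剥离图片链接附加块，防止模型重复读取链接文本。"""
--     if not content:
--         return content
--     indexes = [content.find(IMAGE_BLOCK_MARKER), content.find(ORIGINAL_IMAGE_BLOCK_MARKER), content.find(PROCESSED_IMAGE_BLOCK_MARKER)]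
--     starts = [i for i in indexes if i >= 0]
--     if not starts:
--         return content
--     return content[: min(starts)].rstrip()
-- ===== SOURCE B (Python) =====
-- _MARKERS = ("\n\n[image_urls]\n", "\n\n[original_image_urls]\n", "\n\n[processed_image_urls]\n")
--
--
-- def strip_image_block_from_history(content: str) -> str:
--     """Single left-to-right scan: cut at the first position where any marker starts."""
--     for i in range(len(content)):
--         if content.startswith(_MARKERS, i):
--             return content[:i].rstrip()
--     return content
-- ===== Notes on version B (the rewrite author's own statement) =====
-- stated objective: simpler
-- what changed: Replaces the three separate str.find scans plus filter/min bookkeeping by one left-to-right scan that cuts at the first position where any of the three markers starts (str.startswith with a tuple).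
import Mathlib
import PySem

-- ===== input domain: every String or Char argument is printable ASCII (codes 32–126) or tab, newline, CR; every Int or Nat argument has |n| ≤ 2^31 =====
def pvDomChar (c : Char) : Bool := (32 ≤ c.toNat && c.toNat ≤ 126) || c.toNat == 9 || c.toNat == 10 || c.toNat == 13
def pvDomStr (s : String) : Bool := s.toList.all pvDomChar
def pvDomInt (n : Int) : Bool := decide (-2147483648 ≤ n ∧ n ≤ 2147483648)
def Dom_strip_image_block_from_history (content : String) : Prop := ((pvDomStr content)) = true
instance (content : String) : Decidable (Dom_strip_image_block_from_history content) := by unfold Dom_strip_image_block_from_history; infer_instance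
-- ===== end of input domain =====

-- B replaces A's three str.find scans + filter/min by one left-to-right scan that cuts at
-- the first position where any marker starts (objective: simpler; same asymptotic cost).


-- ===== PORT A =====
def strip_image_block_from_history (content : String) : String :=
  if content = "" then content
  else
    let indexes : List Int :=
      [PySem.Str.find content "\n\n[image_urls]\n",
       PySem.Str.find content "\n\n[original_image_urls]\n",
       PySem.Str.find content "\n\n[processed_image_urls]\n"]
    let starts := indexes.filter (fun i => decide (0 ≤ i))
    match PySem.List.min? starts id with  -- none ↔ starts = [] (Python's 'if not starts')
    | none => content
    | some m => PySem.Str.rstrip (PySem.Str.slice content none (some m))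

-- ===== PORT B =====
def pvMarkers : List (List Char) :=
  ["\n\n[image_urls]\n".toList, "\n\n[original_image_urls]\n".toList, "\n\n[processed_image_urls]\n".toList]

-- content.startswith(_MARKERS, i), applied to the suffix content[i:]
def pvAtMarker (rest : List Char) : Bool :=
  pvMarkers.any (fun m => PySem.Chars.startswith rest m)

-- the for-loop of B: pre is the (reversed) already-scanned prefix, rest the suffix at index i
def pvScan (pre rest : List Char) : Option (List Char) :=
  match rest with
  | [] => none
  | c :: rs =>
    if pvAtMarker (c :: rs) then some (PySem.Chars.rstrip pre.reverse)
    else pvScan (c :: pre) rs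

def strip_image_block_from_history_alt (content : String) : String :=
  match pvScan [] content.toList with
  | some r => String.ofList r
  | none => content

-- ===== PRECONDITION & SPEC =====
def Spec_strip_image_block_from_history (content : String) (out : String) : Prop := out = strip_image_block_from_history_alt content
instance (content : String) (out : String) : Decidable (Spec_strip_image_block_from_history content out) := by unfold Spec_strip_image_block_from_history; infer_instance

-- ===== CLAIM (what is proved, stated in full; the proofs are below) =====
def Claim_equal_strip_image_block_from_history : Prop := ∀ (content : String), Dom_strip_image_block_from_history content → Spec_strip_image_block_from_history content (strip_image_block_from_history content)

-- ===== LEMMAS AND PROOFS =====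

-- If no position of rest starts a marker, B's scan returns none.
theorem pvScan_none (rest : List Char) : ∀ pre, (∀ j, pvAtMarker (rest.drop j) = false) →
    pvScan pre rest = none := by
  induction rest with
  | nil => intro pre _; rfl
  | cons c rs ih =>
    intro pre h
    have h0 := h 0
    simp only [List.drop_zero] at h0
    simp only [pvScan, h0]
    exact ih _ (fun j => h (j + 1))

-- If j is the first position of rest that starts a marker, B's scan cuts there.
theorem pvScan_found (rest : List Char) : ∀ pre j, pvAtMarker (rest.drop j) = true →
    (∀ i, i < j → pvAtMarker (rest.drop i) = false) →
    pvScan pre rest = some (PySem.Chars.rstrip (pre.reverse ++ rest.take j)) := by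
  induction rest with
  | nil =>
    intro pre j hj _
    simp only [List.drop_nil] at hj
    exact absurd hj (by decide)
  | cons c rs ih =>
    intro pre j hj hmin
    by_cases h0 : pvAtMarker (c :: rs) = true
    · have hj0 : j = 0 := by
        by_contra hne
        have := hmin 0 (Nat.pos_of_ne_zero hne)
        simp only [List.drop_zero] at this
        rw [this] at h0; exact absurd h0 (by decide)
      subst hj0
      simp [pvScan, h0]
    · match j with
      | 0 => simp only [List.drop_zero] at hj; exact absurd hj h0
      | j' + 1 =>
        have hb : pvAtMarker (c :: rs) = false := by
          cases hx : pvAtMarker (c :: rs) with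
          | true => exact absurd hx h0
          | false => rfl
        simp only [pvScan, hb, if_neg, Bool.false_eq_true, not_false_iff]
        have := ih (c :: pre) j' (by simpa using hj)
          (fun i hi => by simpa using hmin (i + 1) (by omega))
        rw [this]
        simp

-- A marker nowhere a prefix of any suffix means find = -1.
theorem pv_find_neg (cs sub : List Char) (hsub : sub ∈ pvMarkers)
    (h : ∀ j, pvAtMarker (cs.drop j) = false) : PySem.Chars.find cs sub = -1 := by
  rw [PySem.Chars.find_eq_neg_one_iff]
  intro hinf
  have hin : PySem.Chars.isIn sub cs = true := (PySem.Chars.isIn_iff_infix sub cs).mpr hinf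
  obtain ⟨j, hj⟩ := (PySem.Chars.exists_prefix_drop_iff_isIn sub cs).mpr hin
  have : pvAtMarker (cs.drop j) = true := by
    unfold pvAtMarker
    rw [List.any_eq_true]
    exact ⟨sub, hsub, (PySem.Chars.startswith_iff _ _).mpr hj⟩
  rw [h j] at this; exact absurd this (by decide)

-- With hE the existence of a marker position, every nonnegative find is ≥ the first one.
theorem pv_N_le (cs sub : List Char) (hsub : sub ∈ pvMarkers)
    (hE : ∃ j, pvAtMarker (cs.drop j) = true)
    (hf : 0 ≤ PySem.Chars.find cs sub) :
    ((Nat.find hE : Nat) : Int) ≤ PySem.Chars.find cs sub := by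
  obtain ⟨hpre, _⟩ := PySem.Chars.find_spec hf
  have hp : pvAtMarker (cs.drop (PySem.Chars.find cs sub).toNat) = true := by
    unfold pvAtMarker
    rw [List.any_eq_true]
    exact ⟨sub, hsub, (PySem.Chars.startswith_iff _ _).mpr hpre⟩
  have := Nat.find_min' hE hp
  omega

-- If a marker starts at the first marker position N, its find equals N.
theorem pv_find_eq (cs sub : List Char) (hsub : sub ∈ pvMarkers)
    (hE : ∃ j, pvAtMarker (cs.drop j) = true)
    (hpre : sub <+: cs.drop (Nat.find hE)) :
    PySem.Chars.find cs sub = ((Nat.find hE : Nat) : Int) := by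
  have hf : 0 ≤ PySem.Chars.find cs sub := by
    rw [PySem.Chars.find_nonneg_iff, ← PySem.Chars.isIn_iff_infix,
        ← PySem.Chars.exists_prefix_drop_iff_isIn]
    exact ⟨Nat.find hE, hpre⟩
  obtain ⟨_, hmin⟩ := PySem.Chars.find_spec hf
  have h1 : ((Nat.find hE : Nat) : Int) ≤ PySem.Chars.find cs sub := pv_N_le cs sub hsub hE hf
  have h2 : ¬ (Nat.find hE < (PySem.Chars.find cs sub).toNat) := fun hlt => hmin _ hlt hpre
  omega

theorem strip_equal (content : String) :
    strip_image_block_from_history content = strip_image_block_from_history_alt content := by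
  by_cases hE : ∃ j, pvAtMarker (content.toList.drop j) = true
  · -- a marker occurs; both sides cut at the first marker position N
    set cs := content.toList with hcs
    set N := Nat.find hE with hNdef
    have hN : pvAtMarker (cs.drop N) = true := Nat.find_spec hE
    have hmin : ∀ i, i < N → pvAtMarker (cs.drop i) = false := by
      intro i hi
      have := Nat.find_min hE hi
      cases hx : pvAtMarker (cs.drop i) with
      | true => exact absurd hx this
      | false => rfl
    -- B's side
    have hB : strip_image_block_from_history_alt content
        = String.ofList (PySem.Chars.rstrip (cs.take N)) := by
      unfold strip_image_block_from_history_alt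
      rw [← hcs, pvScan_found cs [] N hN hmin]
      simp
    -- content is nonempty
    have hne : ¬ content = "" := by
      intro h
      rw [h] at hcs
      simp at hcs
      rw [hcs] at hN
      simp at hN
      exact absurd hN (by decide)
    -- which marker starts at N
    have hex : ∃ sub ∈ pvMarkers, sub <+: cs.drop N := by
      unfold pvAtMarker at hN
      rw [List.any_eq_true] at hN
      obtain ⟨sub, hsub, hsw⟩ := hN
      exact ⟨sub, hsub, (PySem.Chars.startswith_iff _ _).mp hsw⟩
    obtain ⟨sub, hsub, hpre⟩ := hex
    have hfeq : PySem.Chars.find cs sub = ((N : Nat) : Int) := pv_find_eq cs sub hsub hE hpre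
    -- A's side
    unfold strip_image_block_from_history
    rw [if_neg hne]
    simp only [PySem.Str.find_eq, ← hcs]
    set f1 := PySem.Chars.find cs ("\n\n[image_urls]\n".toList) with hf1
    set f2 := PySem.Chars.find cs ("\n\n[original_image_urls]\n".toList) with hf2
    set f3 := PySem.Chars.find cs ("\n\n[processed_image_urls]\n".toList) with hf3
    set starts := ([f1, f2, f3].filter (fun i => decide (0 ≤ i))) with hstarts
    have hmem : ((N : Nat) : Int) ∈ starts := by
      have hsub3 : sub = "\n\n[image_urls]\n".toList ∨ sub = "\n\n[original_image_urls]\n".toList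
          ∨ sub = "\n\n[processed_image_urls]\n".toList := by
        simpa [pvMarkers] using hsub
      rcases hsub3 with h | h | h <;> rw [h] at hfeq
      · exact List.mem_filter.mpr ⟨by rw [List.mem_cons, List.mem_cons, List.mem_cons]; exact Or.inl (hf1.trans hfeq).symm, by simp⟩
      · exact List.mem_filter.mpr ⟨by rw [List.mem_cons, List.mem_cons, List.mem_cons]; exact Or.inr (Or.inl (hf2.trans hfeq).symm), by simp⟩
      · exact List.mem_filter.mpr ⟨by rw [List.mem_cons, List.mem_cons, List.mem_cons]; exact Or.inr (Or.inr (Or.inl (hf3.trans hfeq).symm)), by simp⟩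
    have hall : ∀ s ∈ starts, ((N : Nat) : Int) ≤ s := by
      intro s hs
      rw [hstarts, List.mem_filter] at hs
      obtain ⟨hmem3, hposb⟩ := hs
      have hpos : (0 : Int) ≤ s := by simpa using hposb
      simp only [List.mem_cons, List.not_mem_nil, or_false] at hmem3
      rcases hmem3 with h | h | h <;> rw [h]
      · exact pv_N_le cs _ (by simp [pvMarkers]) hE (by rw [← hf1]; rw [h] at hpos; exact hpos)
      · exact pv_N_le cs _ (by simp [pvMarkers]) hE (by rw [← hf2]; rw [h] at hpos; exact hpos)
      · exact pv_N_le cs _ (by simp [pvMarkers]) hE (by rw [← hf3]; rw [h] at hpos; exact hpos)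
    obtain ⟨m0, hm0⟩ : ∃ m0, PySem.List.min? starts id = some m0 := by
      cases hx : PySem.List.min? starts id with
      | some m => exact ⟨m, rfl⟩
      | none =>
        rw [PySem.List.min?_eq_none_iff] at hx
        rw [hx] at hmem
        simp at hmem
    have hm0N : m0 = ((N : Nat) : Int) := by
      have h1 : m0 ∈ starts := PySem.List.min?_mem hm0
      have h2 := PySem.List.min?_isMin hm0 _ hmem
      have h3 := hall m0 h1
      simp only [id] at h2
      omega
    rw [hm0, hm0N, hB]
    apply String.toList_inj.mp
    simp only [PySem.Str.toList_rstrip, PySem.Str.toList_slice, ← hcs]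
    simp [PySem.Chars.slice, PySem.List.slice_to_natCast]
  · -- no marker anywhere: both sides return content unchanged
    have hall : ∀ j, pvAtMarker (content.toList.drop j) = false := by
      intro j
      cases hx : pvAtMarker (content.toList.drop j) with
      | true => exact absurd ⟨j, hx⟩ hE
      | false => rfl
    have hB : strip_image_block_from_history_alt content = content := by
      unfold strip_image_block_from_history_alt
      rw [pvScan_none _ _ hall]
    rw [hB]
    unfold strip_image_block_from_history
    by_cases hc : content = ""
    · rw [if_pos hc]
    · rw [if_neg hc]
      simp only [PySem.Str.find_eq]
      rw [pv_find_neg _ _ (by simp [pvMarkers]) hall,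
          pv_find_neg _ _ (by simp [pvMarkers]) hall,
          pv_find_neg _ _ (by simp [pvMarkers]) hall]
      simp [PySem.List.min?]

-- ===== VERDICT (by name: the statement is the Claim_ definition above) =====
theorem strip_image_block_from_history_spec : Claim_equal_strip_image_block_from_history := by
  intro content _
  unfold Spec_strip_image_block_from_history
  exact strip_equal content
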